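-- pv_equiv track=rewrite | github.com/wyd010616/HIT-NLP | 实验1-B-1190201303-王艺丹/cal_PRF.py | trans_region
-- ===== SOURCE A (Python) =====
-- def trans_region(lines):
--     total = []
--     for line in lines:
--         if line == '\n':
--             continue
--         region = []
--         start = 0
--         line = line[:len(line) - 1].split('/ ') # 去掉最后一个换行符，按'/'切分分词结果
--         for w in line:
--             end = start + len(w)# 计算每个词的区间
--             region.append((start,end)) # 将该词的区间加入该行的list
--             start = end # 更新区间起始坐标
--         if len(region) > 0:
--             total.append(region) # 将不为空的区间加入整个结果的list
--     return total
-- ===== SOURCE B (Python) =====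
-- def trans_region(lines):
--     total = []
--     for line in lines:
--         if line == '\n':
--             continue
--         lens = [len(w) for w in line[:len(line) - 1].split('/ ')]
--         bounds = [sum(lens[:i]) for i in range(len(lens) + 1)]
--         region = list(zip(bounds, bounds[1:]))
--         if region:
--             total.append(region)
--     return total
-- ===== Notes on version B (the rewrite author's own statement) =====
-- stated objective: alternative
-- what changed: Replaces the running start/end accumulator with an explicit prefix-sum boundary table and a zip over adjacent boundaries.
import Mathlib
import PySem

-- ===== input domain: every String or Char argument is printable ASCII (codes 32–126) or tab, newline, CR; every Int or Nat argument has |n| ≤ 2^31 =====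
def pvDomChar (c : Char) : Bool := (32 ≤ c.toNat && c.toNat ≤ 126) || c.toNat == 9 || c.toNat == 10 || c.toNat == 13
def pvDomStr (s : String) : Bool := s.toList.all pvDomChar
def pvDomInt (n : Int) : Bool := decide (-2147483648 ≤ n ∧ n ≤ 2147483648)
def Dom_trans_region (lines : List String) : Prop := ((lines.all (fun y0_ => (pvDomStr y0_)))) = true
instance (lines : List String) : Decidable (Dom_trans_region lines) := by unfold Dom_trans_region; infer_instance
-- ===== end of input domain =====

-- B replaces A's running start/end accumulator with a prefix-sum boundary table zipped over adjacent boundaries; alternative decomposition, same results.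

-- ===== PORT A =====
def trans_region (lines : List String) : List (List (Int × Int)) :=
  lines.foldl (fun total line =>
    if line == "\n" then total
    else
      let parts := (PySem.Str.split? (PySem.Str.slice line none (some (PySem.Str.len line - 1))) "/ ").getD []
      let st := parts.foldl (fun (p : List (Int × Int) × Int) w =>
        let e := p.2 + PySem.Str.len w
        (p.1 ++ [(p.2, e)], e)) ([], 0)
      if st.1.length > 0 then total ++ [st.1] else total) []

-- ===== PORT B =====
def trans_region_alt (lines : List String) : List (List (Int × Int)) :=
  lines.foldl (fun total line =>
    if line == "\n" then total
    else
      let lens := ((PySem.Str.split? (PySem.Str.slice line none (some (PySem.Str.len line - 1))) "/ ").getD []).map PySem.Str.len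
      let bounds := (PySem.List.pyRange 0 (PySem.List.len lens + 1) 1).map
        (fun i => (PySem.List.slice lens none (some i)).sum)
      let region := bounds.zip (PySem.List.slice bounds (some 1) none)
      if region.length > 0 then total ++ [region] else total) []

-- ===== PRECONDITION & SPEC =====
def Spec_trans_region (lines : List String) (out : List (List (Int × Int))) : Prop := out = trans_region_alt lines
instance (lines : List String) (out : List (List (Int × Int))) : Decidable (Spec_trans_region lines out) := by unfold Spec_trans_region; infer_instance

-- ===== CLAIM (what is proved, stated in full; the proofs are below) =====
def Claim_equal_trans_region : Prop := ∀ (lines : List String), Dom_trans_region lines → Spec_trans_region lines (trans_region lines)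

-- ===== LEMMAS AND PROOFS =====

-- A's inner fold, characterized: it appends one interval per word, offset by the running start.
theorem foldA_eq (ws : List String) (acc : List (Int × Int)) (s : Int) :
    ws.foldl (fun (p : List (Int × Int) × Int) w =>
        (p.1 ++ [(p.2, p.2 + PySem.Str.len w)], p.2 + PySem.Str.len w)) (acc, s)
    = (acc ++ (List.range ws.length).map (fun i =>
          (s + ((ws.map PySem.Str.len).take i).sum, s + ((ws.map PySem.Str.len).take (i+1)).sum)),
       s + (ws.map PySem.Str.len).sum) := by
  induction ws generalizing acc s with
  | nil => simp
  | cons w ws ih =>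
    simp only [List.foldl_cons]
    rw [ih]
    rw [Prod.mk.injEq]
    constructor
    · rw [List.append_assoc]
      congr 1
      simp only [List.length_cons, List.range_succ_eq_map, List.map_cons, List.map_map]
      simp [Function.comp, add_assoc, Nat.succ_eq_add_one]
    · simp [add_assoc]

-- zipping a prefix table with its tail yields the consecutive pairs.
theorem zip_consec (n : Nat) (pre : Nat → Int) :
    ((List.range (n+1)).map pre).zip (((List.range (n+1)).map pre).tail)
    = (List.range n).map (fun i => (pre i, pre (i+1))) := by
  induction n generalizing pre with
  | zero => simp
  | succ n ih =>
    rw [List.range_succ_eq_map, List.map_cons, List.map_map, List.tail_cons]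
    have hmap : List.map (pre ∘ Nat.succ) (List.range (n+1))
        = List.map (fun i => pre (i+1)) (List.range (n+1)) := by
      apply List.map_congr_left; intro k _; simp [Nat.succ_eq_add_one]
    rw [hmap]
    have hne : List.map (fun i => pre (i+1)) (List.range (n+1))
        = pre 1 :: List.map ((fun i => pre (i+1)) ∘ Nat.succ) (List.range n) := by
      rw [List.range_succ_eq_map, List.map_cons, List.map_map]
    have hzip := ih (fun i => pre (i+1))
    rw [hne, List.tail_cons] at hzip
    rw [hne, List.zip_cons_cons, hzip]
    rw [List.range_succ_eq_map (n := n), List.map_cons, List.map_map]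
    rfl

-- the two per-line step functions agree.
set_option maxHeartbeats 2000000 in
theorem step_eq (total : List (List (Int × Int))) (line : String) :
    (if line == "\n" then total
     else
       let parts := (PySem.Str.split? (PySem.Str.slice line none (some (PySem.Str.len line - 1))) "/ ").getD []
       let st := parts.foldl (fun (p : List (Int × Int) × Int) w =>
         let e := p.2 + PySem.Str.len w
         (p.1 ++ [(p.2, e)], e)) ([], 0)
       if st.1.length > 0 then total ++ [st.1] else total)
    = (if line == "\n" then total
       else
         let lens := ((PySem.Str.split? (PySem.Str.slice line none (some (PySem.Str.len line - 1))) "/ ").getD []).map PySem.Str.len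
         let bounds := (PySem.List.pyRange 0 (PySem.List.len lens + 1) 1).map
           (fun i => (PySem.List.slice lens none (some i)).sum)
         let region := bounds.zip (PySem.List.slice bounds (some 1) none)
         if region.length > 0 then total ++ [region] else total) := by
  by_cases hnl : line == "\n"
  · simp [hnl]
  · simp only [hnl]
    set parts := (PySem.Str.split? (PySem.Str.slice line none (some (PySem.Str.len line - 1))) "/ ").getD [] with hp
    set lens := parts.map PySem.Str.len with hl
    have hlen : lens.length = parts.length := by simp [hl]
    have hfold := foldA_eq parts [] 0
    have hbounds : (PySem.List.pyRange 0 (PySem.List.len lens + 1) 1).map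
          (fun i => (PySem.List.slice lens none (some i)).sum)
        = (List.range (lens.length + 1)).map (fun k => (lens.take k).sum) := by
      rw [PySem.List.pyRange_one]
      have : ((PySem.List.len lens + 1 - 0).toNat) = lens.length + 1 := by
        simp only [PySem.List.len_eq]; omega
      rw [this, List.map_map]
      apply List.map_congr_left
      intro k _
      simp [Function.comp, PySem.List.slice_to_natCast]
    rw [hfold, hbounds, PySem.List.slice_from_one]
    rw [zip_consec lens.length (fun k => (lens.take k).sum)]
    simp only [List.nil_append, hlen, ← hl, zero_add]

set_option maxHeartbeats 1000000 in
theorem trans_region_spec' (lines : List String) :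
    trans_region lines = trans_region_alt lines := by
  unfold trans_region trans_region_alt
  exact congrArg (fun f => List.foldl f [] lines)
    (funext fun total => funext fun line => step_eq total line)

-- ===== VERDICT (by name: the statement is the Claim_ definition above) =====
theorem trans_region_spec : Claim_equal_trans_region := by
  intro lines _
  exact trans_region_spec' lines
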